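-- pv_equiv track=rewrite | github.com/radosnystudent/Graph-algorithms | algorithms/chinese_postman.py | new_matrix
-- ===== SOURCE A (Python) =====
-- def new_matrix(matrix, paths):
--     pairs = list()
--     matrix_len = len(matrix)
--     for path in paths:
--         for i in range(len(path) - 1):
--             pairs.append([path[i], path[i + 1]])
--
--     fleury = [[] for _ in range(matrix_len)]
--
--     for i in range(matrix_len):
--         for j in range(matrix_len):
--             if matrix[i][j] != '-':
--                 if matrix[i][j] == '0':
--                     fleury[i].append(0)
--                 else:
--                     fleury[i].append(1)
--                     if [i, j] in pairs or [j, i] in pairs: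
--                         fleury[i][j] += 1
--             else:
--                 fleury[i].append(0)
--     return fleury
-- ===== SOURCE B (Python) =====
-- def new_matrix(matrix, paths):
--     n = len(matrix)
--     # base matrix in one pass: '-' and '0' -> 0, anything else -> 1
--     fleury = [[0 if c in ('-', '0') else 1 for c in row[:n]] for row in matrix]
--     # deduplicated set of undirected path edges, normalized as (min, max)
--     edges = set()
--     for path in paths:
--         for a, b in zip(path, path[1:]):
--             edges.add((a, b) if a <= b else (b, a))
--     # each real-edge cell named by an edge gets exactly one extra unit
--     for a, b in edges:
--         if 0 <= a < n and 0 <= b < n: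
--             if fleury[a][b]:
--                 fleury[a][b] += 1
--             if a != b and fleury[b][a]:
--                 fleury[b][a] += 1
--     return fleury
-- ===== Notes on version B (the rewrite author's own statement) =====
-- stated objective: faster
-- what changed: A scans every cell and, per cell, searches the full pairs list for [i,j] or [j,i]; B builds the 0/1 base matrix in one pass, dedupes the path edges into a set of normalized (min,max) tuples, and then touches only the cells named by those edges, so the per-cell linear membership scan disappears.
import Mathlib
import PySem

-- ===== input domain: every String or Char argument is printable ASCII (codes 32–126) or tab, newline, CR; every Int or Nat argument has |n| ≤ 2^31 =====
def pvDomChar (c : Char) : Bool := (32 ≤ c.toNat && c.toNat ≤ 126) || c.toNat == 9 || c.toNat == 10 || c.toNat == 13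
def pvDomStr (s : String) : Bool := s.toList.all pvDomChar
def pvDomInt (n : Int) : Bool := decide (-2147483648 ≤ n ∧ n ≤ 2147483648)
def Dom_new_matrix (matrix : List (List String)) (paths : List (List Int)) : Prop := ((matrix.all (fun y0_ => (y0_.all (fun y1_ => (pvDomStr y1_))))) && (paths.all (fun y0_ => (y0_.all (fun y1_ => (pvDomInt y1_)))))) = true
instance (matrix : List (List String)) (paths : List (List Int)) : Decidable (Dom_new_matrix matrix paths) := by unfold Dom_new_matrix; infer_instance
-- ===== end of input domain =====

-- B replaces A's per-cell linear scan of the pairs list by a one-pass 0/1 base matrix plus a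
-- deduplicated set of normalized path edges, touching only the cells those edges name (objective: faster).


-- ===== PORT A =====
-- for i in range(len(path)-1): pairs.append([path[i], path[i + 1]])

def pairsOfPath (path : List Int) : List (Int × Int) :=
  (PySem.List.pyRange 0 ((path.length : Int) - 1) 1).foldl
    (fun acc i => acc ++ [(PySem.List.pyGetD path i 0, PySem.List.pyGetD path (i + 1) 0)]) []

def new_matrix (matrix : List (List String)) (paths : List (List Int)) : List (List Int) :=
  let pairs : List (Int × Int) := paths.foldl (fun acc path => acc ++ pairsOfPath path) []
  let matrix_len := matrix.length
  let fleury0 : List (List Int) := (List.range matrix_len).foldl (fun acc _ => acc ++ [[]]) []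
  (List.range matrix_len).foldl (fun fl (i : Nat) =>
    (List.range matrix_len).foldl (fun fl (j : Nat) =>
      let cell := (PySem.List.pyGet? ((PySem.List.pyGet? matrix (i : Int)).getD []) (j : Int)).getD ""
      let row := fl.getD i []
      if cell ≠ "-" then
        if cell = "0" then fl.set i (row ++ [(0 : Int)])
        else
          let row1 := row ++ [(1 : Int)]
          let row2 := if pairs.contains ((i : Int), (j : Int)) || pairs.contains ((j : Int), (i : Int))
                      then row1.set j (row1.getD j 0 + 1) else row1
          fl.set i row2
      else fl.set i (row ++ [(0 : Int)])) fl) fleury0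

-- ===== PORT B =====

def b_norm (ab : Int × Int) : Int × Int := if ab.1 ≤ ab.2 then ab else (ab.2, ab.1)

def b_edges (paths : List (List Int)) : PySem.Set (Int × Int) :=
  paths.foldl (fun s path =>
    (path.zip path.tail).foldl (fun s ab => PySem.Set.add s (b_norm ab)) s) PySem.Set.empty

-- if fleury[a][b]: fleury[a][b] += 1   (a no-op on an out-of-shape or non-edge cell)
def b_bump (m : List (List Int)) (a b : Nat) : List (List Int) :=
  let row := m.getD a []
  let v := row.getD b 0
  if v ≠ 0 then m.set a (row.set b (v + 1)) else m

def new_matrix_alt (matrix : List (List String)) (paths : List (List Int)) : List (List Int) :=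
  let n := matrix.length
  let base : List (List Int) :=
    matrix.map (fun row => (row.take n).map (fun c => if c = "-" ∨ c = "0" then (0 : Int) else 1))
  (b_edges paths).foldl (fun fl ab =>
    if 0 ≤ ab.1 ∧ ab.1 < (n : Int) ∧ 0 ≤ ab.2 ∧ ab.2 < (n : Int) then
      if ab.1.toNat ≠ ab.2.toNat then b_bump (b_bump fl ab.1.toNat ab.2.toNat) ab.2.toNat ab.1.toNat
      else b_bump fl ab.1.toNat ab.2.toNat
    else fl) base

-- ===== PRECONDITION & SPEC =====
-- Pre_ excludes exactly the inputs where Python A raises IndexError: some row of `matrix`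
-- shorter than the number of rows (A reads matrix[i][j] for all i, j < len(matrix)).
def Pre_new_matrix (matrix : List (List String)) (paths : List (List Int)) : Prop :=
  ∀ row ∈ matrix, matrix.length ≤ row.length
instance (matrix : List (List String)) (paths : List (List Int)) : Decidable (Pre_new_matrix matrix paths) := by unfold Pre_new_matrix; infer_instance

def pvWitness_new_matrix : List (List String) × List (List Int) :=
  ([["0", "1"], ["1", "-"]], [[0, 1, 0]])

def Spec_new_matrix (matrix : List (List String)) (paths : List (List Int)) (out : List (List Int)) : Prop := out = new_matrix_alt matrix paths
instance (matrix : List (List String)) (paths : List (List Int)) (out : List (List Int)) : Decidable (Spec_new_matrix matrix paths out) := by unfold Spec_new_matrix; infer_instance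

-- ===== CLAIM (what is proved, stated in full; the proofs are below) =====
def Claim_equal_new_matrix : Prop := ∀ (matrix : List (List String)) (paths : List (List Int)), Dom_new_matrix matrix paths → Pre_new_matrix matrix paths → Spec_new_matrix matrix paths (new_matrix matrix paths)

-- ===== LEMMAS AND PROOFS =====
-- Both ports are reduced to the same closed form: entry (i, j) of the answer is `cellVal`.

def cellStr (matrix : List (List String)) (i j : Nat) : String := (matrix.getD i []).getD j ""

def allPairs (paths : List (List Int)) : List (Int × Int) := paths.flatMap (fun p => p.zip p.tail)

def getCell (m : List (List Int)) (i j : Nat) : Int := (m.getD i []).getD j 0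

theorem foldl_update (f : List Int → List (Int × Int)) (paths : List (List Int)) :
    ∀ (s : PySem.Set (Int × Int)), paths.foldl (fun s p => PySem.Set.update s (f p)) s
      = PySem.Set.update s (paths.flatMap f) := by
  induction paths with
  | nil => intro s; simp [PySem.Set.update_nil]
  | cons p rest ih =>
    intro s
    simp only [List.foldl_cons, List.flatMap_cons, ih, PySem.Set.update_append]

theorem b_edges_eq (paths : List (List Int)) :
    b_edges paths = PySem.Set.ofList ((allPairs paths).map b_norm) := by
  unfold b_edges allPairs
  have h : ∀ (s : PySem.Set (Int × Int)) (p : List Int),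
      (p.zip p.tail).foldl (fun s ab => PySem.Set.add s (b_norm ab)) s
        = PySem.Set.update s ((p.zip p.tail).map b_norm) := by
    intro s p; rw [PySem.Set.update_map_eq_foldl_add]
  simp only [h]
  rw [foldl_update (fun p => (p.zip p.tail).map b_norm)]
  rw [show (PySem.Set.empty : PySem.Set (Int × Int)) = [] from rfl, PySem.Set.update_nil_left]
  congr 1
  rw [List.map_flatMap]

theorem bnorm_fst_le (q : Int × Int) : (b_norm q).1 ≤ (b_norm q).2 := by
  obtain ⟨a, b⟩ := q; simp only [b_norm]; split_ifs with h <;> simp <;> omega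

theorem norm_eq_iff (q p : Int × Int) : b_norm q = b_norm p ↔ q = p ∨ q = (p.2, p.1) := by
  obtain ⟨a, b⟩ := q; obtain ⟨c, d⟩ := p
  simp only [b_norm]
  split_ifs with h1 h2 h2 <;> simp only [Prod.mk.injEq] <;> constructor <;> intro hh <;> omega

theorem mem_edges (paths : List (List Int)) (x y : Int) :
    b_norm (x, y) ∈ b_edges paths ↔ (x, y) ∈ allPairs paths ∨ (y, x) ∈ allPairs paths := by
  rw [b_edges_eq, PySem.Set.mem_ofList, List.mem_map]
  constructor
  · rintro ⟨q, hq, hnorm⟩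
    rcases (norm_eq_iff q (x, y)).mp hnorm with h | h
    · left; rwa [h] at hq
    · right; rwa [h] at hq
  · rintro (h | h)
    · exact ⟨(x, y), h, rfl⟩
    · exact ⟨(y, x), h, (norm_eq_iff (y, x) (x, y)).mpr (Or.inr rfl)⟩

theorem nodup_edges (paths : List (List Int)) : (b_edges paths).Nodup := by
  rw [b_edges_eq]; exact PySem.Set.nodup_ofList _

theorem norm_mem_edges_le (paths : List (List Int)) (e : Int × Int) (he : e ∈ b_edges paths) :
    e.1 ≤ e.2 := by
  rw [b_edges_eq, PySem.Set.mem_ofList, List.mem_map] at he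
  obtain ⟨q, _, rfl⟩ := he
  exact bnorm_fst_le q

theorem getD_set_ne' {α : Type} (l : List α) (n k : Nat) (x : α) (d : α) (h : k ≠ n) :
    (l.set n x).getD k d = l.getD k d := by
  simp only [List.getD_eq_getElem?_getD]
  rw [List.getElem?_set_ne (by omega)]

theorem getD_set_self' {α : Type} (l : List α) (n : Nat) (x : α) (d : α) (h : n < l.length) :
    (l.set n x).getD n d = x := by
  rw [List.getD_eq_getElem _ _ (by simpa using h), List.getElem_set_self]

theorem getCell_bump (m : List (List Int)) (a b i j : Nat) :
    getCell (b_bump m a b) i j =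
      if i = a ∧ j = b ∧ getCell m a b ≠ 0 then getCell m a b + 1 else getCell m i j := by
  unfold b_bump getCell
  by_cases hv : (m.getD a []).getD b 0 = 0
  · rw [if_neg (by simpa using hv), if_neg (by tauto)]
  · have hb : b < (m.getD a []).length := by
      by_contra hb
      exact hv (List.getD_eq_default _ _ (by omega))
    have ha : a < m.length := by
      by_contra ha
      rw [List.getD_eq_default _ _ (by omega)] at hb
      simp at hb
    rw [if_pos (by simpa using hv)]
    by_cases hia : i = a
    · subst hia
      rw [getD_set_self' _ _ _ _ ha]
      by_cases hjb : j = b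
      · subst hjb
        rw [getD_set_self' _ _ _ _ hb, if_pos ⟨rfl, rfl, hv⟩]
      · rw [getD_set_ne' _ _ _ _ _ hjb, if_neg (by tauto)]
    · rw [getD_set_ne' _ _ _ _ _ hia, if_neg (by tauto)]

def b_step (n : Nat) (fl : List (List Int)) (ab : Int × Int) : List (List Int) :=
  if 0 ≤ ab.1 ∧ ab.1 < (n : Int) ∧ 0 ≤ ab.2 ∧ ab.2 < (n : Int) then
    if ab.1.toNat ≠ ab.2.toNat then b_bump (b_bump fl ab.1.toNat ab.2.toNat) ab.2.toNat ab.1.toNat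
    else b_bump fl ab.1.toNat ab.2.toNat
  else fl

theorem b_step_cell (n : Nat) (fl : List (List Int)) (a b : Int) (i j : Nat) :
    getCell (b_step n fl (a, b)) i j =
      if ((a = (i : Int) ∧ b = (j : Int)) ∨ (a = (j : Int) ∧ b = (i : Int))) ∧ i < n ∧ j < n ∧ getCell fl i j ≠ 0
      then getCell fl i j + 1 else getCell fl i j := by
  by_cases hr : 0 ≤ a ∧ a < (n : Int) ∧ 0 ≤ b ∧ b < (n : Int)
  · obtain ⟨h0a, han, h0b, hbn⟩ := hr
    obtain ⟨A, rfl⟩ := Int.eq_ofNat_of_zero_le h0a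
    obtain ⟨B, rfl⟩ := Int.eq_ofNat_of_zero_le h0b
    have hAn : A < n := by omega
    have hBn : B < n := by omega
    unfold b_step
    rw [if_pos (by dsimp only; refine ⟨by omega, by omega, by omega, by omega⟩)]
    dsimp only
    simp only [Int.toNat_natCast, Nat.cast_inj]
    by_cases h1 : i = A ∧ j = B
    · obtain ⟨rfl, rfl⟩ := h1
      by_cases hAB : i = j
      · subst hAB
        rw [if_neg (by omega), getCell_bump]
        by_cases hcell : getCell fl i i ≠ 0
        · rw [if_pos ⟨rfl, rfl, hcell⟩, if_pos ⟨Or.inl ⟨rfl, rfl⟩, hAn, hAn, hcell⟩]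
        · rw [if_neg (by tauto), if_neg (by tauto)]
      · rw [if_pos (by omega), getCell_bump, if_neg (by omega), getCell_bump]
        by_cases hcell : getCell fl i j ≠ 0
        · rw [if_pos ⟨rfl, rfl, hcell⟩, if_pos ⟨Or.inl ⟨rfl, rfl⟩, hAn, hBn, hcell⟩]
        · rw [if_neg (by tauto), if_neg (by tauto)]
    · by_cases h2 : i = B ∧ j = A
      · obtain ⟨rfl, rfl⟩ := h2
        have hij : i ≠ j := by tauto
        rw [if_pos (by omega)]
        have hin : getCell (b_bump fl j i) i j = getCell fl i j := by
          rw [getCell_bump, if_neg (by omega)]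
        rw [getCell_bump, hin]
        by_cases hcell : getCell fl i j ≠ 0
        · rw [if_pos ⟨rfl, rfl, hcell⟩, if_pos ⟨Or.inr ⟨rfl, rfl⟩, hBn, hAn, hcell⟩]
        · rw [if_neg (by tauto), if_neg (by tauto)]
      · have e1 : getCell (b_bump fl A B) i j = getCell fl i j := by
          rw [getCell_bump, if_neg (by tauto)]
        have e2 : getCell (b_bump (b_bump fl A B) B A) i j = getCell (b_bump fl A B) i j := by
          rw [getCell_bump, if_neg (by tauto)]
        by_cases hAB : A ≠ B
        · rw [if_pos hAB, e2, e1, if_neg (by tauto)]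
        · rw [if_neg hAB, e1, if_neg (by tauto)]
  · unfold b_step
    rw [if_neg (by dsimp only; exact hr), if_neg]
    rintro ⟨h, hi, hj, -⟩
    rcases h with ⟨rfl, rfl⟩ | ⟨rfl, rfl⟩ <;> exact hr ⟨by omega, by omega, by omega, by omega⟩

theorem b_fold_cell (n : Nat) (es : List (Int × Int)) :
    ∀ (fl : List (List Int)), es.Nodup → (∀ e ∈ es, e.1 ≤ e.2) → ∀ (i j : Nat),
      getCell (es.foldl (b_step n) fl) i j =
        if (((i : Int), (j : Int)) ∈ es ∨ ((j : Int), (i : Int)) ∈ es) ∧ i < n ∧ j < n ∧ getCell fl i j ≠ 0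
        then getCell fl i j + 1 else getCell fl i j := by
  induction es with
  | nil => intro fl _ _ i j; simp
  | cons e rest ih =>
    intro fl hnd hle i j
    obtain ⟨a, b⟩ := e
    simp only [List.foldl_cons]
    rw [ih _ (List.nodup_cons.mp hnd).2 (fun e he => hle e (List.mem_cons_of_mem _ he)) i j]
    rw [b_step_cell]
    by_cases hin : i < n ∧ j < n
    · by_cases hcell : getCell fl i j = 0
      · simp [hcell]
      · by_cases hm : (a = (i : Int) ∧ b = (j : Int)) ∨ (a = (j : Int) ∧ b = (i : Int))
        · have hhead : a ≤ b := by simpa using hle (a, b) List.mem_cons_self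
          have hno : ¬(((i : Int), (j : Int)) ∈ rest ∨ ((j : Int), (i : Int)) ∈ rest) := by
            rintro (h | h)
            · have hij : (i : Int) ≤ (j : Int) := by simpa using hle _ (List.mem_cons_of_mem _ h)
              have heq : ((a, b) : Int × Int) = ((i : Int), (j : Int)) := by
                rcases hm with ⟨rfl, rfl⟩ | ⟨rfl, rfl⟩ <;> simp [Prod.ext_iff] <;> omega
              exact (List.nodup_cons.mp hnd).1 (heq ▸ h)
            · have hij : (j : Int) ≤ (i : Int) := by simpa using hle _ (List.mem_cons_of_mem _ h)
              have heq : ((a, b) : Int × Int) = ((j : Int), (i : Int)) := by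
                rcases hm with ⟨rfl, rfl⟩ | ⟨rfl, rfl⟩ <;> simp [Prod.ext_iff] <;> omega
              exact (List.nodup_cons.mp hnd).1 (heq ▸ h)
          have hstep : ((a = (i : Int) ∧ b = (j : Int)) ∨ (a = (j : Int) ∧ b = (i : Int))) ∧ i < n ∧ j < n ∧ getCell fl i j ≠ 0 := ⟨hm, hin.1, hin.2, hcell⟩
          rw [if_pos hstep]
          rw [if_neg (show ¬((((i : Int), (j : Int)) ∈ rest ∨ ((j : Int), (i : Int)) ∈ rest) ∧ i < n ∧ j < n ∧ getCell fl i j + 1 ≠ 0) from by tauto)]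
          have hmem : (((i : Int), (j : Int)) ∈ (a, b) :: rest ∨ ((j : Int), (i : Int)) ∈ (a, b) :: rest) := by
            rcases hm with ⟨rfl, rfl⟩ | ⟨rfl, rfl⟩
            · exact Or.inl List.mem_cons_self
            · exact Or.inr List.mem_cons_self
          rw [if_pos (show (((i : Int), (j : Int)) ∈ (a, b) :: rest ∨ ((j : Int), (i : Int)) ∈ (a, b) :: rest) ∧ i < n ∧ j < n ∧ getCell fl i j ≠ 0 from ⟨hmem, hin.1, hin.2, hcell⟩)]
        · rw [if_neg (show ¬(((a = (i : Int) ∧ b = (j : Int)) ∨ (a = (j : Int) ∧ b = (i : Int))) ∧ i < n ∧ j < n ∧ getCell fl i j ≠ 0) from by tauto)]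
          have hmeq : (((i : Int), (j : Int)) ∈ (a, b) :: rest ∨ ((j : Int), (i : Int)) ∈ (a, b) :: rest) ↔
              (((i : Int), (j : Int)) ∈ rest ∨ ((j : Int), (i : Int)) ∈ rest) := by
            simp only [List.mem_cons]
            constructor
            · rintro ((h | h) | (h | h))
              · exact absurd (Or.inl ⟨(congrArg Prod.fst h).symm, (congrArg Prod.snd h).symm⟩) hm
              · exact Or.inl h
              · exact absurd (Or.inr ⟨(congrArg Prod.fst h).symm, (congrArg Prod.snd h).symm⟩) hm
              · exact Or.inr h
            · tauto
          simp only [hmeq]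
    · have h1 : ¬(((a = (i : Int) ∧ b = (j : Int)) ∨ (a = (j : Int) ∧ b = (i : Int))) ∧ i < n ∧ j < n ∧ getCell fl i j ≠ 0) := by tauto
      rw [if_neg h1]
      rw [if_neg (show ¬((((i : Int), (j : Int)) ∈ rest ∨ ((j : Int), (i : Int)) ∈ rest) ∧ i < n ∧ j < n ∧ getCell fl i j ≠ 0) from by tauto)]
      rw [if_neg (show ¬((((i : Int), (j : Int)) ∈ (a, b) :: rest ∨ ((j : Int), (i : Int)) ∈ (a, b) :: rest) ∧ i < n ∧ j < n ∧ getCell fl i j ≠ 0) from by tauto)]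

theorem length_bump (m : List (List Int)) (a b : Nat) : (b_bump m a b).length = m.length := by
  simp only [b_bump]; split <;> simp

theorem row_length_bump (m : List (List Int)) (a b i : Nat) :
    ((b_bump m a b).getD i []).length = ((m.getD i []).length) := by
  simp only [b_bump]
  split
  · rename_i hv
    have hb : b < (m.getD a []).length := by
      by_contra hb
      exact hv (List.getD_eq_default _ _ (by omega))
    have ha : a < m.length := by
      by_contra ha
      rw [List.getD_eq_default _ _ (by omega)] at hb
      simp at hb
    by_cases hia : i = a
    · subst hia; rw [getD_set_self' _ _ _ _ ha, List.length_set]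
    · rw [getD_set_ne' _ _ _ _ _ hia]
  · rfl

theorem length_step (n : Nat) (fl : List (List Int)) (e : Int × Int) :
    (b_step n fl e).length = fl.length := by
  unfold b_step; split_ifs <;> simp [length_bump]

theorem row_length_step (n : Nat) (fl : List (List Int)) (e : Int × Int) (i : Nat) :
    ((b_step n fl e).getD i []).length = (fl.getD i []).length := by
  unfold b_step; split_ifs <;> simp only [row_length_bump]

theorem length_fold (n : Nat) (es : List (Int × Int)) :
    ∀ fl : List (List Int), (es.foldl (b_step n) fl).length = fl.length := by
  induction es with
  | nil => intro fl; rfl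
  | cons e rest ih => intro fl; rw [List.foldl_cons, ih, length_step]

theorem row_length_fold (n : Nat) (es : List (Int × Int)) :
    ∀ (fl : List (List Int)) (i : Nat), ((es.foldl (b_step n) fl).getD i []).length = (fl.getD i []).length := by
  induction es with
  | nil => intro fl i; rfl
  | cons e rest ih => intro fl i; rw [List.foldl_cons, ih, row_length_step]

theorem mem_edges_pair (paths : List (List Int)) (x y : Int) :
    ((x, y) ∈ b_edges paths ∨ (y, x) ∈ b_edges paths) ↔ b_norm (x, y) ∈ b_edges paths := by
  constructor
  · rintro (h | h)
    · have hle : x ≤ y := norm_mem_edges_le _ _ h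
      simpa [b_norm, hle] using h
    · have hle : y ≤ x := norm_mem_edges_le _ _ h
      by_cases hxy : x ≤ y
      · have hx : x = y := le_antisymm hxy hle
        subst hx
        simpa [b_norm] using h
      · simpa [b_norm, hxy] using h
  · intro h
    by_cases hxy : x ≤ y
    · left; simpa [b_norm, hxy] using h
    · right; simpa [b_norm, hxy] using h

def cellVal (matrix : List (List String)) (paths : List (List Int)) (i j : Nat) : Int :=
  if cellStr matrix i j = "-" ∨ cellStr matrix i j = "0" then 0
  else if ((i : Int), (j : Int)) ∈ allPairs paths ∨ ((j : Int), (i : Int)) ∈ allPairs paths then 2 else 1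

theorem alt_eq_fold (matrix : List (List String)) (paths : List (List Int)) :
    new_matrix_alt matrix paths =
      (b_edges paths).foldl (b_step matrix.length)
        (matrix.map (fun row => (row.take matrix.length).map (fun c => if c = "-" ∨ c = "0" then (0 : Int) else 1))) := rfl

theorem base_cell (matrix : List (List String)) (hpre : ∀ row ∈ matrix, matrix.length ≤ row.length)
    (i j : Nat) (hi : i < matrix.length) (hj : j < matrix.length) :
    getCell (matrix.map (fun row => (row.take matrix.length).map (fun c => if c = "-" ∨ c = "0" then (0 : Int) else 1))) i j
      = if cellStr matrix i j = "-" ∨ cellStr matrix i j = "0" then 0 else 1 := by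
  have hrow : matrix.length ≤ matrix[i].length := hpre _ (List.getElem_mem hi)
  unfold getCell cellStr
  have h1 : ((matrix.map (fun row => (row.take matrix.length).map (fun c => if c = "-" ∨ c = "0" then (0 : Int) else 1))).getD i ([] : List Int))
      = ((matrix[i].take matrix.length).map (fun c => if c = "-" ∨ c = "0" then (0 : Int) else 1)) := by
    rw [List.getD_eq_getElem _ _ (by simpa using hi), List.getElem_map]
  have h2 : matrix.getD i [] = matrix[i] := List.getD_eq_getElem _ _ hi
  rw [h1, h2]
  rw [List.getD_eq_getElem _ _ (by simp; omega), List.getElem_map, List.getElem_take]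
  rw [List.getD_eq_getElem _ _ (by omega)]

theorem portB_cell (matrix : List (List String)) (paths : List (List Int))
    (hpre : ∀ row ∈ matrix, matrix.length ≤ row.length)
    (i j : Nat) (hi : i < matrix.length) (hj : j < matrix.length) :
    getCell (new_matrix_alt matrix paths) i j = cellVal matrix paths i j := by
  rw [alt_eq_fold]
  rw [b_fold_cell _ _ _ (nodup_edges paths) (fun e he => norm_mem_edges_le _ _ he) i j]
  rw [base_cell matrix hpre i j hi hj]
  rw [cellVal]
  by_cases hs : cellStr matrix i j = "-" ∨ cellStr matrix i j = "0"
  · rw [if_pos hs, if_pos hs, if_neg (by simp [hs])]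
  · rw [if_neg hs, if_neg hs]
    have hmem := (mem_edges_pair paths (i : Int) (j : Int)).trans (mem_edges paths (i : Int) (j : Int))
    by_cases hp : ((i : Int), (j : Int)) ∈ allPairs paths ∨ ((j : Int), (i : Int)) ∈ allPairs paths
    · rw [if_pos ⟨hmem.mpr hp, hi, hj, one_ne_zero⟩, if_pos hp]
      norm_num
    · rw [if_neg (by intro hc; exact hp (hmem.mp hc.1)), if_neg hp]

theorem portB_eq (matrix : List (List String)) (paths : List (List Int))
    (hpre : ∀ row ∈ matrix, matrix.length ≤ row.length) :
    new_matrix_alt matrix paths =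
      (List.range matrix.length).map (fun i => (List.range matrix.length).map (fun j => cellVal matrix paths i j)) := by
  have hlen : (new_matrix_alt matrix paths).length = matrix.length := by
    rw [alt_eq_fold, length_fold]; simp
  have hrowlen : ∀ i : Nat, i < matrix.length → ((new_matrix_alt matrix paths).getD i []).length = matrix.length := by
    intro i hi
    rw [alt_eq_fold, row_length_fold]
    have h1 : ((matrix.map (fun row => (row.take matrix.length).map (fun c => if c = "-" ∨ c = "0" then (0 : Int) else 1))).getD i ([] : List Int))
        = ((matrix[i].take matrix.length).map (fun c => if c = "-" ∨ c = "0" then (0 : Int) else 1)) := by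
      rw [List.getD_eq_getElem _ _ (by simpa using hi), List.getElem_map]
    rw [h1]
    have := hpre _ (List.getElem_mem hi)
    simp
    omega
  apply List.ext_getElem (by simpa using hlen)
  intro i h1 h2
  have hi : i < matrix.length := by omega
  rw [List.getElem_map, List.getElem_range]
  have hrow : (new_matrix_alt matrix paths)[i] = (new_matrix_alt matrix paths).getD i [] :=
    (List.getD_eq_getElem _ _ h1).symm
  apply List.ext_getElem (by rw [hrow, hrowlen i hi]; simp)
  intro j hj1 hj2
  have hj : j < matrix.length := by rw [hrow, hrowlen i hi] at hj1; omega
  rw [List.getElem_map, List.getElem_range]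
  rw [← portB_cell matrix paths hpre i j hi hj]
  simp only [getCell, List.getD_eq_getElem?_getD]
  rw [List.getElem?_eq_getElem h1]
  simp only [Option.getD_some]
  rw [List.getElem?_eq_getElem (show j < (new_matrix_alt matrix paths)[i].length by rw [hrow, hrowlen i hi]; omega)]
  simp only [Option.getD_some]

theorem zip_consec (path : List Int) :
    (List.range (path.length - 1)).map (fun k => (path.getD k 0, path.getD (k+1) 0)) = path.zip path.tail := by
  apply List.ext_getElem
  · simp [List.length_zip]
  · intro i h1 h2
    simp only [List.getElem_map, List.getElem_range, List.getElem_zip, List.getElem_tail]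
    have hi : i < path.length := by simp at h1; omega
    have hi1 : i + 1 < path.length := by simp at h1; omega
    rw [List.getD_eq_getElem _ _ hi, List.getD_eq_getElem _ _ hi1]

theorem pairsOfPath_eq (path : List Int) : pairsOfPath path = path.zip path.tail := by
  unfold pairsOfPath
  rw [PySem.List.foldl_append_singleton_eq_map, PySem.List.pyRange_one]
  simp only [List.nil_append, List.map_map]
  have hlen : ((path.length : Int) - 1 - 0).toNat = path.length - 1 := by omega
  rw [hlen, ← zip_consec]
  apply List.map_congr_left
  intro k hk
  simp at hk
  have h1 : (0 : Int) + (k : Int) = ((k : Nat) : Int) := by push_cast; ring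
  have h2 : (0 : Int) + (k : Int) + 1 = (((k + 1 : Nat)) : Int) := by push_cast; ring
  simp only [Function.comp, h1, PySem.List.pyGetD_natCast]
  rw [show ((k : Int) + 1) = (((k + 1 : Nat)) : Int) from by push_cast; ring, PySem.List.pyGetD_natCast]

def aCell (matrix : List (List String)) (pairs : List (Int × Int)) (i j : Nat) : Int :=
  if cellStr matrix i j ≠ "-" then
    if cellStr matrix i j = "0" then 0
    else if pairs.contains ((i : Int), (j : Int)) || pairs.contains ((j : Int), (i : Int)) then 2 else 1
  else 0

theorem pairs_eq (paths : List (List Int)) :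
    paths.foldl (fun acc path => acc ++ pairsOfPath path) [] = allPairs paths := by
  rw [PySem.List.foldl_append_eq_flatMap]
  have hfun : pairsOfPath = (fun p : List Int => p.zip p.tail) := funext pairsOfPath_eq
  rw [List.nil_append, hfun, allPairs]

theorem a_step (matrix : List (List String)) (pairs : List (Int × Int)) (i : Nat)
    (fl : List (List Int)) (j : Nat) (hi : i < fl.length) (hlen : (fl.getD i []).length = j) :
    (fun (fl : List (List Int)) (j : Nat) =>
      let cell := (PySem.List.pyGet? ((PySem.List.pyGet? matrix (i : Int)).getD []) (j : Int)).getD ""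
      let row := fl.getD i []
      if cell ≠ "-" then
        if cell = "0" then fl.set i (row ++ [(0 : Int)])
        else
          let row1 := row ++ [(1 : Int)]
          let row2 := if pairs.contains ((i : Int), (j : Int)) || pairs.contains ((j : Int), (i : Int))
                      then row1.set j (row1.getD j 0 + 1) else row1
          fl.set i row2
      else fl.set i (row ++ [(0 : Int)])) fl j
    = fl.set i ((fl.getD i []) ++ [aCell matrix pairs i j]) := by
  have hcell : (PySem.List.pyGet? ((PySem.List.pyGet? matrix (i : Int)).getD []) (j : Int)).getD ""
      = cellStr matrix i j := by
    simp only [PySem.List.pyGet?_natCast, cellStr, List.getD_eq_getElem?_getD]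
  dsimp only
  rw [hcell]
  by_cases h1 : cellStr matrix i j = "-"
  · have hA : aCell matrix pairs i j = 0 := by simp [aCell, h1]
    rw [hA, if_neg (by simp [h1])]
  · rw [if_pos (by simp [h1])]
    by_cases h2 : cellStr matrix i j = "0"
    · have hA : aCell matrix pairs i j = 0 := by simp [aCell, h1, h2]
      rw [hA, if_pos h2]
    · rw [if_neg h2]
      by_cases h3 : (pairs.contains ((i : Int), (j : Int)) || pairs.contains ((j : Int), (i : Int))) = true
      · have hA : aCell matrix pairs i j = 2 := by
          unfold aCell; rw [if_pos (by simp [h1]), if_neg h2, if_pos h3]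
        have hgd : ((fl.getD i []) ++ [(1 : Int)]).getD j 0 = 1 := by
          rw [← hlen, List.getD_eq_getElem?_getD, List.getElem?_concat_length, Option.getD_some]
        have hst : ((fl.getD i []) ++ [(1 : Int)]).set j (1 + 1) = (fl.getD i []) ++ [2] := by
          rw [← hlen, List.set_append_right _ _ (le_refl _), Nat.sub_self]
          rfl
        rw [hA, if_pos h3, hgd, hst]
      · have hA : aCell matrix pairs i j = 1 := by
          unfold aCell; rw [if_pos (by simp [h1]), if_neg h2, if_neg h3]
        rw [hA, if_neg h3]

theorem set_getD_self {α : Type} (l : List α) (i : Nat) (d : α) (h : i < l.length) :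
    l.set i (l.getD i d) = l := by
  apply List.ext_getElem (by simp)
  intro t h1 h2
  rw [List.getElem_set]
  split
  · rename_i heq; subst heq; exact List.getD_eq_getElem _ _ h
  · rfl

def a_innerF (matrix : List (List String)) (pairs : List (Int × Int)) (i : Nat) :
    List (List Int) → Nat → List (List Int) := fun fl j =>
  let cell := (PySem.List.pyGet? ((PySem.List.pyGet? matrix (i : Int)).getD []) (j : Int)).getD ""
  let row := fl.getD i []
  if cell ≠ "-" then
    if cell = "0" then fl.set i (row ++ [(0 : Int)])
    else
      let row1 := row ++ [(1 : Int)]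
      let row2 := if pairs.contains ((i : Int), (j : Int)) || pairs.contains ((j : Int), (i : Int))
                  then row1.set j (row1.getD j 0 + 1) else row1
      fl.set i row2
  else fl.set i (row ++ [(0 : Int)])

def a_outerF (matrix : List (List String)) (pairs : List (Int × Int)) :
    List (List Int) → Nat → List (List Int) := fun fl i =>
  (List.range matrix.length).foldl (a_innerF matrix pairs i) fl

theorem a_stepF (matrix : List (List String)) (pairs : List (Int × Int)) (i : Nat)
    (fl : List (List Int)) (j : Nat) (hi : i < fl.length) (hlen : (fl.getD i []).length = j) :
    a_innerF matrix pairs i fl j = fl.set i ((fl.getD i []) ++ [aCell matrix pairs i j]) := by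
  unfold a_innerF
  exact a_step matrix pairs i fl j hi hlen

theorem a_inner (matrix : List (List String)) (pairs : List (Int × Int)) (i : Nat) :
    ∀ (m s : Nat) (fl : List (List Int)), i < fl.length → (fl.getD i []).length = s →
      (List.range' s m).foldl (a_innerF matrix pairs i) fl
        = fl.set i ((fl.getD i []) ++ (List.range' s m).map (fun j => aCell matrix pairs i j)) := by
  intro m
  induction m with
  | zero =>
    intro s fl hi hlen
    rw [show List.range' s 0 = ([] : List Nat) from rfl, List.foldl_nil, List.map_nil,
      List.append_nil, set_getD_self _ _ _ hi]
  | succ m ih =>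
    intro s fl hi hlen
    rw [List.range'_succ, List.foldl_cons, a_stepF matrix pairs i fl s hi hlen]
    rw [ih (s + 1) _ (by simpa using hi)
      (by rw [getD_set_self' _ _ _ _ hi]; simp only [List.length_append, List.length_cons, List.length_nil]; omega)]
    rw [getD_set_self' _ _ _ _ hi, List.set_set]
    simp

theorem set_map_row (n : Nat) (rowFun : Nat → List Int) (s : Nat) (hs : s < n) :
    ((List.range' 0 n).map (fun t => if t < s then rowFun t else [])).set s (rowFun s)
      = (List.range' 0 n).map (fun t => if t < s + 1 then rowFun t else []) := by
  apply List.ext_getElem (by simp)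
  intro t h1 h2
  simp only [List.length_map, List.length_range'] at h1
  rw [List.getElem_set]
  split
  · rename_i heq
    rw [List.getElem_map, List.getElem_range']
    simp only [Nat.zero_add, Nat.one_mul]
    rw [if_pos (by omega), ← heq]
  · rename_i hne
    rw [List.getElem_map, List.getElem_range', List.getElem_map, List.getElem_range']
    simp only [Nat.zero_add, Nat.one_mul]
    split_ifs <;> first | rfl | omega

theorem a_houter (matrix : List (List String)) (pairs : List (Int × Int))
    (fl : List (List Int)) (i : Nat) (h1 : fl.length = matrix.length) (h2 : i < matrix.length)
    (h3 : fl.getD i [] = []) :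
    a_outerF matrix pairs fl i = fl.set i ((List.range' 0 matrix.length).map (fun j => aCell matrix pairs i j)) := by
  unfold a_outerF
  rw [List.range_eq_range', a_inner matrix pairs i matrix.length 0 fl (by omega) (by rw [h3]; rfl), h3, List.nil_append]

theorem a_outer (matrix : List (List String)) (pairs : List (Int × Int)) :
    ∀ (m s : Nat), s + m = matrix.length →
      (List.range' s m).foldl (a_outerF matrix pairs)
          ((List.range' 0 matrix.length).map (fun t => if t < s then (List.range' 0 matrix.length).map (fun j => aCell matrix pairs t j) else []))
        = (List.range' 0 matrix.length).map (fun t => if t < s + m then (List.range' 0 matrix.length).map (fun j => aCell matrix pairs t j) else []) := by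
  intro m
  induction m with
  | zero => intro s hs; simp
  | succ m ih =>
    intro s hs
    have hs' : s < matrix.length := by omega
    rw [List.range'_succ, List.foldl_cons]
    rw [a_houter matrix pairs _ s (by simp) hs'
      (by rw [List.getD_eq_getElem _ _ (by simp [hs']), List.getElem_map, List.getElem_range']; simp)]
    rw [set_map_row _ _ _ hs', ih (s + 1) (by omega)]
    have : s + 1 + m = s + (m + 1) := by omega
    rw [this]

theorem new_matrix_eq_fold (matrix : List (List String)) (paths : List (List Int)) :
    new_matrix matrix paths
      = (List.range matrix.length).foldl (a_outerF matrix (allPairs paths))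
          ((List.range matrix.length).foldl (fun acc _ => acc ++ [[]]) []) := by
  have h : new_matrix matrix paths
      = (List.range matrix.length).foldl (a_outerF matrix (paths.foldl (fun acc path => acc ++ pairsOfPath path) []))
          ((List.range matrix.length).foldl (fun acc _ => acc ++ [[]]) []) := rfl
  rw [h, pairs_eq]

theorem aCell_allPairs (matrix : List (List String)) (paths : List (List Int)) (i j : Nat) :
    aCell matrix (allPairs paths) i j = cellVal matrix paths i j := by
  unfold aCell cellVal
  by_cases h1 : cellStr matrix i j = "-"
  · rw [if_neg (by simp [h1]), if_pos (Or.inl h1)]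
  · by_cases h2 : cellStr matrix i j = "0"
    · rw [if_pos (by simp [h1]), if_pos h2, if_pos (Or.inr h2)]
    · rw [if_pos (by simp [h1]), if_neg h2, if_neg (not_or.mpr ⟨h1, h2⟩)]
      by_cases h3 : ((i : Int), (j : Int)) ∈ allPairs paths ∨ ((j : Int), (i : Int)) ∈ allPairs paths
      · rw [if_pos (by simpa using h3), if_pos h3]
      · rw [if_neg (by simpa using h3), if_neg h3]

theorem portA_eq (matrix : List (List String)) (paths : List (List Int)) :
    new_matrix matrix paths =
      (List.range matrix.length).map (fun i => (List.range matrix.length).map (fun j => cellVal matrix paths i j)) := by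
  rw [new_matrix_eq_fold]
  rw [PySem.List.foldl_append_singleton_eq_map (f := fun _ : Nat => ([] : List Int)), List.nil_append]
  rw [List.range_eq_range']
  have hinit : (List.range' 0 matrix.length).map (fun _ : Nat => ([] : List Int))
      = (List.range' 0 matrix.length).map (fun t => if t < 0 then (List.range' 0 matrix.length).map (fun j => aCell matrix (allPairs paths) t j) else []) := by
    simp
  rw [hinit, a_outer matrix (allPairs paths) matrix.length 0 (by omega)]
  apply List.map_congr_left
  intro t ht
  have htn : t < matrix.length := by
    have := List.mem_range'_1.mp ht
    omega
  rw [if_pos (by omega)]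
  apply List.map_congr_left
  intro u _
  exact aCell_allPairs matrix paths t u


-- ===== VERDICT (by name: the statement is the Claim_ definition above) =====
theorem new_matrix_spec : Claim_equal_new_matrix := by
  intro matrix paths _ hpre
  unfold Spec_new_matrix
  rw [portA_eq, portB_eq matrix paths hpre]
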